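-- pv_equiv track=rewrite | github.com/sueszli/vector-database-benchmark | dataset/python-mutated/distribute_transpiler.py | _get_optimizer_input_shape
-- ===== SOURCE A (Python) =====
-- def _get_optimizer_input_shape(op_type, varkey, orig_shape, param_shape):
--     if False:
--         while True:
--             i = 10
--     '\n        Returns the shape for optimizer inputs that need to be reshaped when\n        Param and Grad is split to multiple servers.\n        '
--     if op_type == 'adam':
--         if varkey in ['Moment1', 'Moment2']:
--             return param_shape
--     elif op_type == 'adagrad':
--         if varkey == 'Moment':
--             return param_shape
--     elif op_type == 'adamax':
--         if varkey in ['Moment', 'InfNorm']: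
--             return param_shape
--     elif op_type in ['momentum', 'lars_momentum']:
--         if varkey == 'Velocity':
--             return param_shape
--     elif op_type == 'rmsprop':
--         if varkey in ['Moment', 'MeanSquare']:
--             return param_shape
--     elif op_type == 'decayed_adagrad':
--         if varkey == 'Moment':
--             return param_shape
--     elif op_type == 'ftrl':
--         if varkey in ['SquaredAccumulator', 'LinearAccumulator']:
--             return param_shape
--     elif op_type == 'sgd':
--         pass
--     else:
--         raise ValueError('Not supported optimizer for distributed training: %s' % op_type)
--     return orig_shape
-- ===== SOURCE B (Python) =====
-- # Inverted lookup: keyed by varkey first (varkey -> optimizers that reshape it),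
-- # instead of dispatching on op_type as A does.
-- _VALID_OPS = frozenset({'adam', 'adagrad', 'adamax', 'momentum', 'lars_momentum',
--                         'rmsprop', 'decayed_adagrad', 'ftrl', 'sgd'})
--
-- _OPS_RESHAPING_VARKEY = {
--     'Moment1': ('adam',),
--     'Moment2': ('adam',),
--     'Moment': ('adagrad', 'adamax', 'rmsprop', 'decayed_adagrad'),
--     'InfNorm': ('adamax',),
--     'Velocity': ('momentum', 'lars_momentum'),
--     'MeanSquare': ('rmsprop',),
--     'SquaredAccumulator': ('ftrl',),
--     'LinearAccumulator': ('ftrl',),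
-- }
--
-- def _get_optimizer_input_shape(op_type, varkey, orig_shape, param_shape):
--     if op_type not in _VALID_OPS:
--         raise ValueError('Not supported optimizer for distributed training: %s' % op_type)
--     return param_shape if op_type in _OPS_RESHAPING_VARKEY.get(varkey, ()) else orig_shape
-- ===== Notes on version B (the rewrite author's own statement) =====
-- stated objective: alternative
-- what changed: Inverts the dispatch direction: instead of A's nine-branch if/elif cascade on op_type with an inner varkey test, B validates op_type against a set and answers by looking up the INVERTED index varkey -> optimizers-that-reshape-it and testing op_type membership there.
import Mathlib
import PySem

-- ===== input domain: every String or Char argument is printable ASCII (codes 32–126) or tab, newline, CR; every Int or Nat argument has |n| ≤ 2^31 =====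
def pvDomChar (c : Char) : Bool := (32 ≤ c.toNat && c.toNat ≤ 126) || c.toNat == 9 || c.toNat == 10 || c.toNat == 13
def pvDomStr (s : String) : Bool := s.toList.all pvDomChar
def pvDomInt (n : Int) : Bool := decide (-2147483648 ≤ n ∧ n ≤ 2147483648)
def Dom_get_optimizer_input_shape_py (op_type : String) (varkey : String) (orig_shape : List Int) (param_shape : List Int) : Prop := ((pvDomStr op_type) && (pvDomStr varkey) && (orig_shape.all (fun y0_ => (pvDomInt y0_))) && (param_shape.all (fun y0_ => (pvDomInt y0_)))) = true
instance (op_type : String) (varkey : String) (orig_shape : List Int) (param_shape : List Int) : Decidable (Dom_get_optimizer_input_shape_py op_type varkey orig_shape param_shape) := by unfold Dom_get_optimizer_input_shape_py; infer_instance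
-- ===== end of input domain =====

-- B inverts A's dispatch: it validates op_type against a set and consults an inverted index
-- varkey -> optimizers-that-reshape-it, instead of A's if/elif cascade on op_type.
-- ===== PORT A =====
-- Port of A: the if/elif cascade, branch for branch. In the final 'else' Python raises
-- ValueError; Pre_ excludes that case and the port returns orig_shape there (unreached).
def get_optimizer_input_shape_py (op_type : String) (varkey : String) (orig_shape : List Int) (param_shape : List Int) : List Int :=
  if op_type = "adam" then
    (if varkey ∈ ["Moment1", "Moment2"] then param_shape else orig_shape)
  else if op_type = "adagrad" then
    (if varkey = "Moment" then param_shape else orig_shape)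
  else if op_type = "adamax" then
    (if varkey ∈ ["Moment", "InfNorm"] then param_shape else orig_shape)
  else if op_type ∈ ["momentum", "lars_momentum"] then
    (if varkey = "Velocity" then param_shape else orig_shape)
  else if op_type = "rmsprop" then
    (if varkey ∈ ["Moment", "MeanSquare"] then param_shape else orig_shape)
  else if op_type = "decayed_adagrad" then
    (if varkey = "Moment" then param_shape else orig_shape)
  else if op_type = "ftrl" then
    (if varkey ∈ ["SquaredAccumulator", "LinearAccumulator"] then param_shape else orig_shape)
  else if op_type = "sgd" then
    orig_shape
  else
    orig_shape  -- Python raises ValueError here; excluded by Pre_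

-- ===== PORT B =====
-- B's set of supported optimizers
def validOps : PySem.Set String :=
  PySem.Set.ofList ["adam", "adagrad", "adamax", "momentum", "lars_momentum",
    "rmsprop", "decayed_adagrad", "ftrl", "sgd"]

-- B's inverted index: varkey -> optimizers for which that varkey is reshaped
def opsReshapingVarkey : PySem.Dict String (List String) :=
  PySem.Dict.ofList [("Moment1", ["adam"]),
   ("Moment2", ["adam"]),
   ("Moment", ["adagrad", "adamax", "rmsprop", "decayed_adagrad"]),
   ("InfNorm", ["adamax"]),
   ("Velocity", ["momentum", "lars_momentum"]),
   ("MeanSquare", ["rmsprop"]),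
   ("SquaredAccumulator", ["ftrl"]),
   ("LinearAccumulator", ["ftrl"])]

-- Port of B: validity check (Python raises ValueError on failure; excluded by Pre_),
-- then membership of op_type in the inverted index's entry for varkey.
def get_optimizer_input_shape_py_alt (op_type : String) (varkey : String) (orig_shape : List Int) (param_shape : List Int) : List Int :=
  if op_type ∈ validOps then
    (if op_type ∈ PySem.Dict.getD opsReshapingVarkey varkey [] then param_shape else orig_shape)
  else
    orig_shape  -- Python raises ValueError here; excluded by Pre_

-- ===== PRECONDITION & SPEC =====
-- Pre_ excludes exactly the op_types on which A raises ValueError ('Not supported optimizer').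
def Pre_get_optimizer_input_shape_py (op_type : String) (varkey : String) (orig_shape : List Int) (param_shape : List Int) : Prop :=
  op_type ∈ ["adam", "adagrad", "adamax", "momentum", "lars_momentum", "rmsprop", "decayed_adagrad", "ftrl", "sgd"]
instance (op_type : String) (varkey : String) (orig_shape : List Int) (param_shape : List Int) : Decidable (Pre_get_optimizer_input_shape_py op_type varkey orig_shape param_shape) := by unfold Pre_get_optimizer_input_shape_py; infer_instance
def pvWitness_get_optimizer_input_shape_py : String × String × List Int × List Int := ("adam", "Moment1", [10, 4], [5, 4])

def Spec_get_optimizer_input_shape_py (op_type : String) (varkey : String) (orig_shape : List Int) (param_shape : List Int) (out : List Int) : Prop := out = get_optimizer_input_shape_py_alt op_type varkey orig_shape param_shape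
instance (op_type : String) (varkey : String) (orig_shape : List Int) (param_shape : List Int) (out : List Int) : Decidable (Spec_get_optimizer_input_shape_py op_type varkey orig_shape param_shape out) := by unfold Spec_get_optimizer_input_shape_py; infer_instance

-- ===== CLAIM =====
def Claim_equal_get_optimizer_input_shape_py : Prop := ∀ (op_type : String) (varkey : String) (orig_shape : List Int) (param_shape : List Int), Dom_get_optimizer_input_shape_py op_type varkey orig_shape param_shape → Pre_get_optimizer_input_shape_py op_type varkey orig_shape param_shape → Spec_get_optimizer_input_shape_py op_type varkey orig_shape param_shape (get_optimizer_input_shape_py op_type varkey orig_shape param_shape)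


-- ===== LEMMAS AND PROOFS =====
lemma validOps_eval : validOps = ["adam", "adagrad", "adamax", "momentum", "lars_momentum",
    "rmsprop", "decayed_adagrad", "ftrl", "sgd"] := by
  simp [validOps, PySem.Set.ofList_eq_foldl, PySem.Set.add, PySem.Set.contains, List.foldl]

set_option maxHeartbeats 1000000 in
lemma opsReshapingVarkey_eval : opsReshapingVarkey = PySem.Dict.mk [("Moment1", ["adam"]),
    ("Moment2", ["adam"]),
    ("Moment", ["adagrad", "adamax", "rmsprop", "decayed_adagrad"]),
    ("InfNorm", ["adamax"]),
    ("Velocity", ["momentum", "lars_momentum"]),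
    ("MeanSquare", ["rmsprop"]),
    ("SquaredAccumulator", ["ftrl"]),
    ("LinearAccumulator", ["ftrl"])] := by
  simp [opsReshapingVarkey, PySem.Dict.ofList, PySem.Dict.update, PySem.Dict.insert,
    PySem.Dict.contains, PySem.Dict.empty, List.foldl]

lemma getD_opsReshaping (v : String) : PySem.Dict.getD opsReshapingVarkey v [] =
    if "Moment1" = v then ["adam"]
    else if "Moment2" = v then ["adam"]
    else if "Moment" = v then ["adagrad", "adamax", "rmsprop", "decayed_adagrad"]
    else if "InfNorm" = v then ["adamax"]
    else if "Velocity" = v then ["momentum", "lars_momentum"]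
    else if "MeanSquare" = v then ["rmsprop"]
    else if "SquaredAccumulator" = v then ["ftrl"]
    else if "LinearAccumulator" = v then ["ftrl"]
    else [] := by
  rw [opsReshapingVarkey_eval]
  simp only [PySem.Dict.getD, PySem.Dict.get?_mk_cons, beq_iff_eq]
  split_ifs <;> simp [PySem.Dict.get?]

-- Exhaustive case split on varkey: either it is one of the eight indexed keys, or the
-- inverted index gives the empty list (with the disequalities recorded for simp).
lemma key_cases (v : String) : v = "Moment1" ∨ v = "Moment2" ∨ v = "Moment" ∨ v = "InfNorm" ∨
    v = "Velocity" ∨ v = "MeanSquare" ∨ v = "SquaredAccumulator" ∨ v = "LinearAccumulator" ∨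
    (PySem.Dict.getD opsReshapingVarkey v [] = [] ∧
      v ≠ "Moment1" ∧ v ≠ "Moment2" ∧ v ≠ "Moment" ∧ v ≠ "InfNorm" ∧ v ≠ "Velocity" ∧
      v ≠ "MeanSquare" ∧ v ≠ "SquaredAccumulator" ∧ v ≠ "LinearAccumulator") := by
  by_cases h1 : "Moment1" = v
  · exact Or.inl h1.symm
  by_cases h2 : "Moment2" = v
  · exact Or.inr (Or.inl h2.symm)
  by_cases h3 : "Moment" = v
  · exact Or.inr (Or.inr (Or.inl h3.symm))
  by_cases h4 : "InfNorm" = v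
  · exact Or.inr (Or.inr (Or.inr (Or.inl h4.symm)))
  by_cases h5 : "Velocity" = v
  · exact Or.inr (Or.inr (Or.inr (Or.inr (Or.inl h5.symm))))
  by_cases h6 : "MeanSquare" = v
  · exact Or.inr (Or.inr (Or.inr (Or.inr (Or.inr (Or.inl h6.symm)))))
  by_cases h7 : "SquaredAccumulator" = v
  · exact Or.inr (Or.inr (Or.inr (Or.inr (Or.inr (Or.inr (Or.inl h7.symm))))))
  by_cases h8 : "LinearAccumulator" = v
  · exact Or.inr (Or.inr (Or.inr (Or.inr (Or.inr (Or.inr (Or.inr (Or.inl h8.symm)))))))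
  refine Or.inr (Or.inr (Or.inr (Or.inr (Or.inr (Or.inr (Or.inr (Or.inr
    ⟨?_, fun e => h1 e.symm, fun e => h2 e.symm, fun e => h3 e.symm, fun e => h4 e.symm,
      fun e => h5 e.symm, fun e => h6 e.symm, fun e => h7 e.symm, fun e => h8 e.symm⟩)))))))
  rw [getD_opsReshaping]
  simp [if_neg h1, if_neg h2, if_neg h3, if_neg h4, if_neg h5, if_neg h6, if_neg h7, if_neg h8]

-- ===== VERDICT =====
set_option maxHeartbeats 1000000 in
theorem get_optimizer_input_shape_py_spec : Claim_equal_get_optimizer_input_shape_py := by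
  intro op_type varkey orig_shape param_shape _ hpre
  unfold Spec_get_optimizer_input_shape_py
  unfold Pre_get_optimizer_input_shape_py at hpre
  simp only [List.mem_cons, List.not_mem_nil, or_false] at hpre
  rcases hpre with rfl | rfl | rfl | rfl | rfl | rfl | rfl | rfl | rfl <;>
    rcases key_cases varkey with rfl|rfl|rfl|rfl|rfl|rfl|rfl|rfl|hn <;>
      simp_all [get_optimizer_input_shape_py, get_optimizer_input_shape_py_alt,
        getD_opsReshaping, validOps_eval]
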